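-- pv_equiv track=rewrite | github.com/AnkitG0204/DeepPokedex | preprocess.py | bucket_segment
-- ===== SOURCE A (Python) =====
-- def bucket_segment(path_list, n_bucket):
--     total_num = len(path_list)
--     bucket_len = total_num // (n_bucket + 1) + 1
--
--     segment_list = []
--     for start in range(0, total_num, bucket_len):
--         end = min(start + bucket_len, total_num)
--         segment_list.append(path_list[start: end])
--
--     return segment_list
-- ===== SOURCE B (Python) =====
-- def bucket_segment(path_list, n_bucket):
--     bucket_len = len(path_list) // (n_bucket + 1) + 1
--     if bucket_len <= 0:
--         return []
--     segment_list = []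
--     cur = []
--     for p in path_list:
--         cur.append(p)
--         if len(cur) == bucket_len:
--             segment_list.append(cur)
--             cur = []
--     if cur:
--         segment_list.append(cur)
--     return segment_list
-- ===== Notes on version B (the rewrite author's own statement) =====
-- stated objective: alternative
-- what changed: B builds the same partition by a single per-element accumulation pass (append to a current bucket, flush when it reaches bucket_len, with a nonpositive-size guard) instead of A's index-stepped range loop with slicing.
import Mathlib
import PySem

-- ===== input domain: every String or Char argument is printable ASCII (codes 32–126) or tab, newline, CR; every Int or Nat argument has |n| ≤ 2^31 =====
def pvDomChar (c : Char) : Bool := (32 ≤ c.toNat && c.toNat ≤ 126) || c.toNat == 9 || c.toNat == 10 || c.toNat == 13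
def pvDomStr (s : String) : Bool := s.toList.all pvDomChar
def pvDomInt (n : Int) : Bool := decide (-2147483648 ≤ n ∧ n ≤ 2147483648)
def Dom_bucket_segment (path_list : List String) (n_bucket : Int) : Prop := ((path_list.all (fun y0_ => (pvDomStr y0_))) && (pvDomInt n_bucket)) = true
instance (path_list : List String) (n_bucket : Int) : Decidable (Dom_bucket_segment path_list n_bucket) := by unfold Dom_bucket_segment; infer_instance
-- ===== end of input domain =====

-- One line: B replaces A's stepped-range slicing by a single per-element accumulation pass (alternative decomposition, same O(n) cost).

-- ===== PORT A =====
def bucket_segment (path_list : List String) (n_bucket : Int) : List (List String) :=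
  let total_num : Int := path_list.length
  let bucket_len : Int := PySem.Int.floordiv total_num (n_bucket + 1) + 1
  (PySem.List.pyRange 0 total_num bucket_len).foldl
    (fun segment_list start =>
      let «end» := min (start + bucket_len) total_num
      segment_list ++ [PySem.List.slice path_list (some start) (some «end»)]) []

-- ===== PORT B =====
-- B's loop: carry (segment_list, cur); flush cur when it reaches bucket_len; append leftover cur at the end.
def bucketAltLoop (k : Nat) (l : List String) (cur : List String) (seg : List (List String)) : List (List String) :=
  match l with
  | [] => if cur = [] then seg else seg ++ [cur]
  | p :: rest =>
      if (cur ++ [p]).length = k then bucketAltLoop k rest [] (seg ++ [cur ++ [p]])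
      else bucketAltLoop k rest (cur ++ [p]) seg

def bucket_segment_alt (path_list : List String) (n_bucket : Int) : List (List String) :=
  let bucket_len : Int := PySem.Int.floordiv (path_list.length : Int) (n_bucket + 1) + 1
  if bucket_len ≤ 0 then []
  else bucketAltLoop bucket_len.toNat path_list [] []

-- ===== PRECONDITION & SPEC =====
-- Pre_ excludes exactly the inputs where Python A raises: n_bucket = -1 (ZeroDivisionError) and
-- inputs whose computed bucket_len is 0 (range() step zero, ValueError).
def Pre_bucket_segment (path_list : List String) (n_bucket : Int) : Prop :=
  n_bucket + 1 ≠ 0 ∧ PySem.Int.floordiv (path_list.length : Int) (n_bucket + 1) + 1 ≠ 0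
instance (path_list : List String) (n_bucket : Int) : Decidable (Pre_bucket_segment path_list n_bucket) := by unfold Pre_bucket_segment; infer_instance
def pvWitness_bucket_segment : List String × Int := (["a", "b", "c"], 1)

def Spec_bucket_segment (path_list : List String) (n_bucket : Int) (out : List (List String)) : Prop := out = bucket_segment_alt path_list n_bucket
instance (path_list : List String) (n_bucket : Int) (out : List (List String)) : Decidable (Spec_bucket_segment path_list n_bucket out) := by unfold Spec_bucket_segment; infer_instance

-- ===== CLAIM (what is proved, stated in full; the proofs are below) =====
def Claim_equal_bucket_segment : Prop := ∀ (path_list : List String) (n_bucket : Int), Dom_bucket_segment path_list n_bucket → Pre_bucket_segment path_list n_bucket → Spec_bucket_segment path_list n_bucket (bucket_segment path_list n_bucket)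

-- ===== LEMMAS AND PROOFS =====

-- reference partition: buckets of size k+1
def chunksRef (k : Nat) : List String → List (List String)
  | [] => []
  | x :: xs => (x :: xs.take k) :: chunksRef k (xs.drop k)
  termination_by l => l.length
  decreasing_by simp only [List.length_drop, List.length_cons]; omega

theorem chunksRef_nil (k : Nat) : chunksRef k [] = [] := by
  unfold chunksRef
  rfl

theorem chunksRef_ne_nil (k : Nat) (l : List String) (h : l ≠ []) :
    chunksRef k l = l.take (k + 1) :: chunksRef k (l.drop (k + 1)) := by
  cases l with
  | nil => exact absurd rfl h
  | cons x xs => rw [chunksRef]; simp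

theorem bucketAltLoop_append (k : Nat) (l cur : List String) (seg s : List (List String)) :
    bucketAltLoop k l cur (seg ++ s) = seg ++ bucketAltLoop k l cur s := by
  induction l generalizing cur seg s with
  | nil => unfold bucketAltLoop; split <;> simp
  | cons p rest ih =>
      unfold bucketAltLoop
      split
      · rw [List.append_assoc, ih, ih]
      · exact ih _ _ _

theorem bucketAltLoop_eq_chunksRef (k : Nat) (hk : 0 < k) (l cur : List String)
    (hc : cur.length < k) :
    bucketAltLoop k l cur [] = chunksRef (k - 1) (cur ++ l) := by
  induction l generalizing cur with
  | nil =>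
      unfold bucketAltLoop
      split
      · subst ‹cur = []›; simp [chunksRef_nil]
      · rename_i h
        rw [List.append_nil, chunksRef_ne_nil _ _ h]
        have h1 : cur.take (k - 1 + 1) = cur := List.take_of_length_le (by omega)
        have h2 : cur.drop (k - 1 + 1) = [] := List.drop_eq_nil_of_le (by omega)
        simp [h1, h2, chunksRef_nil]
  | cons p rest ih =>
      unfold bucketAltLoop
      split
      · rename_i hlen
        have hne : cur ++ p :: rest ≠ [] := by simp
        rw [chunksRef_ne_nil _ _ hne]
        have e : cur ++ p :: rest = (cur ++ [p]) ++ rest := by simp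
        have ht : (cur ++ p :: rest).take (k - 1 + 1) = cur ++ [p] := by
          rw [e]
          have h : k - 1 + 1 = (cur ++ [p]).length := by simp at hlen ⊢; omega
          rw [h, List.take_left]
        have hd : (cur ++ p :: rest).drop (k - 1 + 1) = rest := by
          rw [e]
          have h : k - 1 + 1 = (cur ++ [p]).length := by simp at hlen ⊢; omega
          rw [h, List.drop_left]
        rw [ht, hd]
        have happ := bucketAltLoop_append k rest [] [cur ++ [p]] []
        simp only [List.append_nil, List.nil_append] at happ ⊢
        rw [happ, ih [] (by simpa using hk)]
        simp
      · rename_i hlen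
        have hlt : (cur ++ [p]).length < k := by
          simp at hlen ⊢
          omega
        rw [ih (cur ++ [p]) hlt]
        simp

theorem pyRange_pos_nil (a b s : Int) (hs : 0 < s) (hba : b ≤ a) :
    PySem.List.pyRange a b s = [] := by
  rw [PySem.List.pyRange_of_pos a b hs]
  have h : ¬ a < b := by omega
  simp [h]

theorem pyRange_neg_nil (a b s : Int) (hs : s < 0) (hba : a ≤ b) :
    PySem.List.pyRange a b s = [] := by
  unfold PySem.List.pyRange
  have h0 : ¬ s = 0 := by omega
  have h1 : ¬ 0 < s := by omega
  have h2 : ¬ b < a := by omega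
  simp [h0, h1, h2]

theorem pyRange_pos_cons (a b s : Int) (hs : 0 < s) (hab : a < b) :
    PySem.List.pyRange a b s = a :: PySem.List.pyRange (a + s) b s := by
  rw [PySem.List.pyRange_of_pos a b hs, PySem.List.pyRange_of_pos (a + s) b hs]
  have hsplit : (b - a + s - 1) / s = (b - a - 1) / s + 1 := by
    have h := Int.add_mul_ediv_right (b - a - 1) 1 (by omega : s ≠ 0)
    have e : b - a + s - 1 = b - a - 1 + 1 * s := by ring
    rw [e, h]
  by_cases hlt : a + s < b
  · have hc : ((b - a + s - 1) / s).toNat = ((b - (a + s) + s - 1) / s).toNat + 1 := by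
      have e : b - (a + s) + s - 1 = b - a - 1 := by ring
      rw [e, hsplit]
      have h0 : 0 ≤ (b - a - 1) / s := Int.ediv_nonneg (by omega) (by omega)
      omega
    simp only [hab, if_pos, hlt, hc, List.range_succ_eq_map]
    simp only [List.map_cons, List.map_map]
    refine List.cons_eq_cons.mpr ⟨by simp, ?_⟩
    apply List.map_congr_left
    intro x _
    simp only [Function.comp_apply]
    push_cast [Nat.succ_eq_add_one]
    ring
  · have h1 : (b - a - 1) / s = 0 := Int.ediv_eq_zero_of_lt (by omega) (by omega)
    have hc : ((b - a + s - 1) / s).toNat = 1 := by rw [hsplit, h1]; rfl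
    simp [hab, hlt, hc]

-- slice of l at nat offset m with clamped end = take k of drop m
theorem slice_min_eq (l : List String) (m : Nat) (k : Int) (hk : 0 < k) :
    PySem.List.slice l (some (m : Int)) (some (min ((m : Int) + k) (l.length : Int)))
      = (l.drop m).take k.toNat := by
  by_cases h : (m : Int) + k ≤ (l.length : Int)
  · have e : min ((m : Int) + k) (l.length : Int) = (m : Int) + (k.toNat : Int) := by omega
    rw [e, PySem.List.slice_natCast_add]
  · have hm : min ((m : Int) + k) (l.length : Int) = ((l.length : Nat) : Int) := by omega
    rw [hm, PySem.List.slice_natCast]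
    rw [List.take_of_length_le (by simp), List.take_of_length_le (by simp; omega)]

theorem flatA_eq_chunksRef (l : List String) (k : Int) (hk : 0 < k) :
    ∀ (fuel m : Nat), l.length ≤ m + fuel →
    (PySem.List.pyRange (m : Int) (l.length : Int) k).flatMap
      (fun start => [PySem.List.slice l (some start) (some (min (start + k) (l.length : Int)))])
      = chunksRef (k.toNat - 1) (l.drop m) := by
  intro fuel
  induction fuel with
  | zero =>
      intro m hm
      rw [pyRange_pos_nil _ _ _ hk (by exact_mod_cast hm)]
      rw [List.drop_eq_nil_of_le (by omega : l.length ≤ m)]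
      simp [chunksRef_nil]
  | succ fuel ih =>
      intro m hm
      by_cases hlt : m < l.length
      · rw [pyRange_pos_cons _ _ _ hk (by exact_mod_cast hlt)]
        rw [List.flatMap_cons]
        have e : ((m : Int) + k) = ((m + k.toNat : Nat) : Int) := by push_cast; omega
        have hk' : 1 ≤ k.toNat := by omega
        have hfin : l.length ≤ (m + k.toNat) + fuel := by omega
        rw [slice_min_eq l m k hk, e]
        rw [chunksRef_ne_nil _ _ (by simp [List.drop_eq_nil_iff]; omega)]
        have hk1 : k.toNat - 1 + 1 = k.toNat := by omega
        rw [hk1, ih (m + k.toNat) hfin, List.singleton_append]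
        refine List.cons_eq_cons.mpr ⟨rfl, ?_⟩
        rw [List.drop_drop]
      · rw [pyRange_pos_nil _ _ _ hk (by exact_mod_cast (by omega : l.length ≤ m))]
        rw [List.drop_eq_nil_of_le (by omega)]
        simp [chunksRef_nil]

-- ===== VERDICT (by name: the statement is the Claim_ definition above) =====
theorem bucket_segment_spec : Claim_equal_bucket_segment := by
  intro path_list n_bucket _ hpre
  unfold Spec_bucket_segment bucket_segment bucket_segment_alt
  simp only []
  set bl : Int := PySem.Int.floordiv (path_list.length : Int) (n_bucket + 1) + 1 with hbl
  by_cases hpos : bl ≤ 0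
  · have hneg : bl < 0 := lt_of_le_of_ne hpos hpre.2
    rw [if_pos hpos, pyRange_neg_nil 0 (path_list.length : Int) bl hneg (by positivity)]
    simp
  · have hk : 0 < bl := by omega
    rw [if_neg hpos]
    rw [PySem.List.foldl_append_eq_flatMap
      (fun start => [PySem.List.slice path_list (some start) (some (min (start + bl) (path_list.length : Int)))])]
    rw [List.nil_append]
    have hA := flatA_eq_chunksRef path_list bl hk path_list.length 0 (by omega)
    simp only [Nat.cast_zero, List.drop_zero] at hA
    rw [hA, bucketAltLoop_eq_chunksRef bl.toNat (by omega) path_list [] (by simp; omega)]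
    simp
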